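-- pv_equiv track=rewrite | github.com/LucasBusavs/ANM_Sort | ANM_Sort.py | count
-- ===== SOURCE A (Python) =====
-- def boundPhase(block, notFound):
--     notFound = []
--     start = block.find("<td>Fase</td>")
--     start = start + 19
--     end = start +1
--     if start!=-1:
--         while block[start:end].find("<") == -1:
--             end = end + 1
--         end = end - 1
--     else:
--         notFound.append(block)
--     return start, end
--
-- def count(phases, splitFile, notFound):
--     phasesCount = [0] * len(phases)
--     for block in splitFile:
--         if block!=splitFile[0]:
--             start, end = boundPhase(block, notFound)
--             phase = block[start:end]
--             for i in range(len(phases)):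
--                 if phases[i]==phase:
--                     phasesCount[i] = phasesCount[i] + 1
--                     break
--     return phasesCount
-- ===== SOURCE B (Python) =====
-- def boundPhase(block, notFound):
--     notFound = []
--     start = block.find("<td>Fase</td>")
--     start = start + 19
--     end = start + 1
--     if start != -1:
--         while block[start:end].find("<") == -1:
--             end = end + 1
--         end = end - 1
--     else:
--         notFound.append(block)
--     return start, end
--
--
-- def count(phases, splitFile, notFound):
--     # one pass over the blocks builds a frequency table of parsed phase labels;
--     # a second pass over `phases` reads it off, zeroing duplicate labels (the
--     # original's break gives the whole count to the first matching slot).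
--     table = {}
--     if splitFile:
--         first = splitFile[0]
--         for block in splitFile:
--             if block != first:
--                 start, end = boundPhase(block, notFound)
--                 phase = block[start:end]
--                 table[phase] = table.get(phase, 0) + 1
--     seen = set()
--     result = []
--     for p in phases:
--         if p in seen:
--             result.append(0)
--         else:
--             seen.add(p)
--             result.append(table.get(p, 0))
--     return result
-- ===== Notes on version B (the rewrite author's own statement) =====
-- stated objective: alternative
-- what changed: Replaces the per-block linear scan over phases (increment first match, break) by one pass building a dict phase-label -> frequency over the blocks and a second pass over phases reading the table, zeroing labels already seen at an earlier index.
import Mathlib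
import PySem

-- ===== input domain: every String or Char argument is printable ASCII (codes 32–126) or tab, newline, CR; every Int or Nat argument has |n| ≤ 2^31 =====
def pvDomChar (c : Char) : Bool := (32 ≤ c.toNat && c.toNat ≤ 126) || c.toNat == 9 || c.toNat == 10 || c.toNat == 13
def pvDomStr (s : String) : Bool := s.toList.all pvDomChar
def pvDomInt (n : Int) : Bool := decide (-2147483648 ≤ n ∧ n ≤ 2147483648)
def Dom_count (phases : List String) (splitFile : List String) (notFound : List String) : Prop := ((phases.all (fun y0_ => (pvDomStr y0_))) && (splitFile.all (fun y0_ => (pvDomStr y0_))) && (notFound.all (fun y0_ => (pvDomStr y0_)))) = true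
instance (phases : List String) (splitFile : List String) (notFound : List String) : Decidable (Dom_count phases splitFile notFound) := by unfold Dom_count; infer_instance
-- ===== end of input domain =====

-- B replaces A's per-block scan over `phases` by a frequency dict built in one pass over the
-- blocks plus a table read-off over `phases` (duplicates zeroed): a different decomposition.
-- Neither program observably mutates its arguments (boundPhase rebinds notFound locally).

-- ===== PORT A =====
-- Python's `while block[start:end].find("<") == -1: end += 1` — transliterated with fuel
-- |block|+1, enough for every terminating run of the Python loop (which diverges, and the
-- fuel runs out, exactly when the block has no "<" at/after start).
def pvWhile (cs : List Char) (start : Int) (e : Int) (fuel : Nat) : Int :=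
  match fuel with
  | 0 => e
  | fuel + 1 =>
    if PySem.Chars.find (PySem.List.slice cs (some start) (some e)) ['<'] == -1 then
      pvWhile cs start (e + 1) fuel
    else e

-- `notFound = []` rebinds a local name in Python (caller unaffected); the else-branch is dead
-- (start = find+19 ≥ 18 ≠ -1) but is kept, transliterated.
def boundPhase (block : String) (notFound : List String) : Int × Int :=
  let _notFound : List String := []
  let start := PySem.Str.find block "<td>Fase</td>"
  let start := start + 19
  let e := start + 1
  if start != -1 then
    let e := pvWhile block.toList start e (block.toList.length + 1)
    (start, e - 1)
  else
    (start, e)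

def innerLoop (phases : List String) (phase : String) (pc : List Int) (i : Nat) : List Int :=
  if h : i < phases.length then
    if phases[i] == phase then pc.set i (pc.getD i 0 + 1)
    else innerLoop phases phase pc (i + 1)
  else pc
termination_by phases.length - i

-- splitFile[0] is only evaluated when the loop body runs, i.e. splitFile ≠ []: headD "" is exact there
def count (phases : List String) (splitFile : List String) (notFound : List String) : List Int :=
  let phasesCount := List.replicate phases.length (0 : Int)
  splitFile.foldl (fun pc block =>
    if block != splitFile.headD "" then
      let se := boundPhase block notFound
      let phase := PySem.Str.slice block (some se.1) (some se.2)
      innerLoop phases phase pc 0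
    else pc) phasesCount

-- ===== PORT B =====
def count_alt (phases : List String) (splitFile : List String) (notFound : List String) : List Int :=
  let first := splitFile.headD ""
  let table := splitFile.foldl (fun (d : PySem.Dict String Int) block =>
    if block != first then
      let se := boundPhase block notFound
      let phase := PySem.Str.slice block (some se.1) (some se.2)
      d.insert phase (d.getD phase 0 + 1)
    else d) PySem.Dict.empty
  (phases.foldl (fun (acc : PySem.Set String × List Int) p =>
    if PySem.Set.contains acc.1 p then (acc.1, acc.2 ++ [(0 : Int)])
    else (PySem.Set.add acc.1 p, acc.2 ++ [table.getD p 0])) (PySem.Set.ofList [], [])).2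

-- ===== PRECONDITION & SPEC =====
-- No Pre_: both ports are total and agree on every input.  (Python A itself DIVERGES on a
-- processed block with no '<' at/after index find("<td>Fase</td>")+19; the fuel-bounded port
-- returns a value there, and so does B's port — the equivalence below covers those inputs too.)
def Spec_count (phases : List String) (splitFile : List String) (notFound : List String) (out : List Int) : Prop := out = count_alt phases splitFile notFound
instance (phases : List String) (splitFile : List String) (notFound : List String) (out : List Int) : Decidable (Spec_count phases splitFile notFound out) := by unfold Spec_count; infer_instance

-- ===== CLAIM (what is proved, stated in full; the proofs are below) =====
def Claim_equal_count : Prop := ∀ (phases : List String) (splitFile : List String) (notFound : List String), Dom_count phases splitFile notFound → Spec_count phases splitFile notFound (count phases splitFile notFound)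

-- ===== LEMMAS AND PROOFS =====

-- the parsed phase label of a block (shared by both ports)
def pvParse (block : String) (notFound : List String) : String :=
  let se := boundPhase block notFound
  PySem.Str.slice block (some se.1) (some se.2)

-- small getD/set facts used below
theorem pv_getD_set_eq (l : List Int) (i : Nat) (v : Int) (h : i < l.length) :
    (l.set i v).getD i 0 = v := by
  simp [List.getD_eq_getElem?_getD, h]

theorem pv_getD_set_ne (l : List Int) (i j : Nat) (v : Int) (h : i ≠ j) :
    (l.set i v).getD j 0 = l.getD j 0 := by
  simp [List.getD_eq_getElem?_getD, h]

-- a skip-the-first-block fold is a plain fold over the parsed labels of the kept blocks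
theorem pv_filter_fold {σ : Type} (f : σ → String → σ) (first : String) (nf : List String) :
    ∀ (l : List String) (s : σ),
      l.foldl (fun s b => if b != first then f s (pvParse b nf) else s) s
        = ((l.filter (fun b => b != first)).map (fun b => pvParse b nf)).foldl f s := by
  intro l
  induction l with
  | nil => intro s; rfl
  | cons b t ih =>
    intro s
    rw [List.foldl_cons, List.filter_cons]
    by_cases hb : (b != first) = true
    · rw [if_pos hb, if_pos hb, List.map_cons, List.foldl_cons, ih]
    · rw [if_neg hb, if_neg hb, ih]

theorem innerLoop_eq (phases : List String) (phase : String) :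
    ∀ (i : Nat) (pc : List Int),
      innerLoop phases phase pc i =
        if phase ∈ phases.drop i
        then pc.set (i + (phases.drop i).idxOf phase)
              (pc.getD (i + (phases.drop i).idxOf phase) 0 + 1)
        else pc := by
  have main : ∀ (n i : Nat), phases.length - i ≤ n → ∀ pc : List Int,
      innerLoop phases phase pc i =
        if phase ∈ phases.drop i
        then pc.set (i + (phases.drop i).idxOf phase)
              (pc.getD (i + (phases.drop i).idxOf phase) 0 + 1)
        else pc := by
    intro n
    induction n with
    | zero =>
      intro i hle pc
      have hge : phases.length ≤ i := by omega
      have : ¬ i < phases.length := by omega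
      rw [innerLoop]
      simp [this, List.drop_eq_nil_of_le hge]
    | succ n ih =>
      intro i hle pc
      rw [innerLoop]
      by_cases h : i < phases.length
      · have hdrop : phases.drop i = phases[i] :: phases.drop (i + 1) :=
          List.drop_eq_getElem_cons h
        by_cases he : (phases[i] == phase) = true
        · have heq : phases[i] = phase := eq_of_beq he
          rw [hdrop]
          simp [h, he, heq, List.idxOf_cons]
        · have hne : phases[i] ≠ phase := fun hh => he (by simp [hh])
          simp only [h, dif_pos, he, Bool.false_eq_true, if_false]
          rw [ih (i + 1) (by omega) pc]
          by_cases hm : phase ∈ phases.drop (i + 1)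
          · have hm2 : phase ∈ phases.drop i := by
              rw [hdrop]; exact List.mem_cons_of_mem _ hm
            rw [if_pos hm, if_pos hm2]
            have hidx : (phases.drop i).idxOf phase
                = (phases.drop (i + 1)).idxOf phase + 1 := by
              rw [hdrop]; exact List.idxOf_cons_ne _ hne
            rw [hidx]
            have harith : i + ((phases.drop (i + 1)).idxOf phase + 1)
                = (i + 1) + (phases.drop (i + 1)).idxOf phase := by omega
            rw [harith]
          · have hm2 : phase ∉ phases.drop i := by
              rw [hdrop]
              intro hc
              rcases List.mem_cons.mp hc with h1 | h1
              · exact hne h1.symm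
              · exact hm h1
            rw [if_neg hm, if_neg hm2]
      · have hge : phases.length ≤ i := by omega
        simp [h, List.drop_eq_nil_of_le hge]
  intro i pc
  exact main (phases.length - i) i le_rfl pc

theorem innerLoop_len (phases : List String) (phase : String) (i : Nat) (pc : List Int) :
    (innerLoop phases phase pc i).length = pc.length := by
  rw [innerLoop_eq]
  split <;> simp

theorem foldA_len (phases : List String) (ps : List String) :
    ∀ pc : List Int, (ps.foldl (fun pc ph => innerLoop phases ph pc 0) pc).length = pc.length := by
  induction ps with
  | nil => intro pc; rfl
  | cons ph t ih => intro pc; rw [List.foldl_cons, ih, innerLoop_len]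

theorem foldA_getD (phases : List String) :
    ∀ (ps : List String) (pc : List Int), pc.length = phases.length →
      ∀ (j : Nat) (hj : j < phases.length),
        (ps.foldl (fun pc ph => innerLoop phases ph pc 0) pc).getD j 0
          = pc.getD j 0 + (if phases.idxOf phases[j] = j then (ps.count phases[j] : Int) else 0) := by
  intro ps
  induction ps with
  | nil =>
    intro pc h j hj
    simp
  | cons ph t ih =>
    intro pc h j hj
    have hj' : j < phases.length := hj
    rw [List.foldl_cons, ih _ (by rw [innerLoop_len]; exact h) j hj]
    rw [innerLoop_eq]
    simp only [List.drop_zero, Nat.zero_add]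
    have hcnt : ((ph :: t).count phases[j] : Int)
        = (t.count phases[j] : Int) + (if phases[j] = ph then 1 else 0) := by
      by_cases hc : phases[j] = ph
      · simp [List.count_cons, hc]
      · have hb1 : (ph == phases[j]) = false := beq_false_of_ne (fun hh => hc hh.symm)
        have hb2 : (phases[j] == ph) = false := beq_false_of_ne hc
        simp [List.count_cons, hc, hb1, hb2]
    by_cases hm : ph ∈ phases
    · have hklt : phases.idxOf ph < phases.length := List.idxOf_lt_length_of_mem hm
      have hpk : phases[phases.idxOf ph] = ph := List.getElem_idxOf hklt
      rw [if_pos hm]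
      by_cases hjk : j = phases.idxOf ph
      · have hpj : phases[j] = ph := by subst hjk; exact hpk
        have hmask : phases.idxOf phases[j] = j := by rw [hpj, ← hjk]
        rw [← hjk, pv_getD_set_eq _ _ _ (by omega), hcnt]
        simp only [hpj]
        rw [if_pos hjk.symm, if_pos hjk.symm]
        simp only [if_true]
        ring
      · rw [pv_getD_set_ne _ _ _ _ (fun hh => hjk hh.symm), hcnt]
        by_cases hmask : phases.idxOf phases[j] = j
        · have hpj : phases[j] ≠ ph := by
            intro hh
            exact hjk (by rw [← hmask, hh])
          simp [hmask, hpj]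
        · simp [hmask]
    · rw [if_neg hm]
      by_cases hmask : phases.idxOf phases[j] = j
      · have hpj : phases[j] ≠ ph := fun hh => hm (hh ▸ List.getElem_mem hj)
        simp [hmask, hcnt, hpj]
      · simp [hmask]

-- B's second pass, as a structural function
def pvBRes (table : PySem.Dict String Int) : PySem.Set String → List String → List Int
  | _, [] => []
  | s, p :: t => (if PySem.Set.contains s p then 0 else table.getD p 0) :: pvBRes table (PySem.Set.add s p) t

theorem pvBRes_fold (table : PySem.Dict String Int) :
    ∀ (l : List String) (s : PySem.Set String) (acc : List Int),
      (l.foldl (fun acc p =>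
        if PySem.Set.contains acc.1 p then (acc.1, acc.2 ++ [(0 : Int)])
        else (PySem.Set.add acc.1 p, acc.2 ++ [table.getD p 0])) (s, acc)).2
        = acc ++ pvBRes table s l := by
  intro l
  induction l with
  | nil => intro s acc; simp [pvBRes]
  | cons p t ih =>
    intro s acc
    rw [List.foldl_cons]
    by_cases hc : PySem.Set.contains s p = true
    · have hmem : p ∈ s := (PySem.Set.contains_iff s p).mp hc
      rw [if_pos hc, ih, pvBRes, PySem.Set.add_of_mem hmem, if_pos hc, List.append_assoc]
      rfl
    · rw [if_neg hc, ih, pvBRes, if_neg hc, List.append_assoc]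
      rfl

theorem pvBRes_len (table : PySem.Dict String Int) :
    ∀ (l : List String) (s : PySem.Set String), (pvBRes table s l).length = l.length := by
  intro l
  induction l with
  | nil => intro s; rfl
  | cons p t ih => intro s; simp [pvBRes, ih]

theorem pvBRes_getD (table : PySem.Dict String Int) :
    ∀ (l : List String) (s : PySem.Set String) (j : Nat), (hj : j < l.length) →
      (pvBRes table s l).getD j 0
        = if l[j] ∈ s ∨ l[j] ∈ l.take j then 0 else table.getD l[j] 0 := by
  intro l
  induction l with
  | nil => intro s j hj; simp at hj
  | cons p t ih =>
    intro s j hj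
    cases j with
    | zero =>
      by_cases hp : p ∈ s
      · simp [pvBRes, (PySem.Set.contains_iff s p).mpr hp, hp]
      · have hc : PySem.Set.contains s p = false := by
          cases hcc : PySem.Set.contains s p
          · rfl
          · exact absurd ((PySem.Set.contains_iff s p).mp hcc) hp
        simp [pvBRes, hc, hp]
    | succ j =>
      have hj' : j < t.length := by simpa using hj
      simp only [pvBRes, List.getD_cons_succ]
      rw [ih (PySem.Set.add s p) j hj']
      have hmem : t[j] ∈ PySem.Set.add s p ∨ t[j] ∈ t.take j ↔
          (p :: t)[j + 1] ∈ s ∨ (p :: t)[j + 1] ∈ (p :: t).take (j + 1) := by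
        simp only [List.getElem_cons_succ, List.take_succ_cons, List.mem_cons,
          PySem.Set.mem_add]
        tauto
      by_cases hcond : t[j] ∈ PySem.Set.add s p ∨ t[j] ∈ t.take j
      · rw [if_pos hcond, if_pos (hmem.mp hcond)]
      · rw [if_neg hcond, if_neg (fun hh => hcond (hmem.mpr hh))]
        simp

theorem pv_mem_take_iff (l : List String) (x : String) (n : Nat) :
    ∀ hx : x ∈ l, (x ∈ l.take n ↔ l.idxOf x < n) := by
  induction l generalizing n with
  | nil => intro hx; simp at hx
  | cons a t ih =>
    intro hx
    cases n with
    | zero => simp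
    | succ n =>
      by_cases ha : (a == x) = true
      · have : a = x := eq_of_beq ha
        subst this
        simp [List.take_succ_cons, List.idxOf_cons, ha]
      · have hne : a ≠ x := fun hh => ha (by simp [hh])
        have hx' : x ∈ t := by
          rcases List.mem_cons.mp hx with h1 | h1
          · exact absurd h1.symm hne
          · exact h1
        rw [List.take_succ_cons, List.idxOf_cons_ne _ hne]
        constructor
        · intro hh
          rcases List.mem_cons.mp hh with h1 | h1
          · exact absurd h1.symm hne
          · have := (ih n hx').mp h1; omega
        · intro hh
          exact List.mem_cons_of_mem _ ((ih n hx').mpr (by omega))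

theorem mem_take_iff_idxOf_ne (l : List String) (j : Nat) (hj : j < l.length) :
    l[j] ∈ l.take j ↔ l.idxOf l[j] ≠ j := by
  have hx : l[j] ∈ l := List.getElem_mem hj
  have h1 : l[j] ∈ l.take (j + 1) := by
    have hlt : j < (l.take (j + 1)).length := by
      rw [List.length_take]; omega
    have : (l.take (j + 1))[j]'hlt = l[j] := List.getElem_take
    rw [← this]
    exact List.getElem_mem _
  have h2 : l.idxOf l[j] < j + 1 := (pv_mem_take_iff l l[j] (j + 1) hx).mp h1
  rw [pv_mem_take_iff l l[j] j hx]
  omega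

-- ===== VERDICT (by name: the statement is the Claim_ definition above) =====
theorem count_spec : Claim_equal_count := by
  unfold Claim_equal_count
  intro phases splitFile notFound _
  -- both folds, with the per-block parsing written through pvParse (definitionally the ports' bodies)
  show List.foldl (fun (pc : List Int) b =>
        if (b != splitFile.headD "") = true then innerLoop phases (pvParse b notFound) pc 0 else pc)
        (List.replicate phases.length 0) splitFile
      = (List.foldl (fun (acc : PySem.Set String × List Int) p =>
          if PySem.Set.contains acc.1 p then (acc.1, acc.2 ++ [(0 : Int)])
          else (PySem.Set.add acc.1 p, acc.2 ++
            [(List.foldl (fun (d : PySem.Dict String Int) b =>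
                if (b != splitFile.headD "") = true then
                  d.insert (pvParse b notFound) (d.getD (pvParse b notFound) 0 + 1)
                else d) PySem.Dict.empty splitFile).getD p 0]))
          (PySem.Set.ofList [], []) phases).2
  have hA : List.foldl (fun (pc : List Int) b =>
        if (b != splitFile.headD "") = true then innerLoop phases (pvParse b notFound) pc 0 else pc)
        (List.replicate phases.length 0) splitFile
      = List.foldl (fun pc ph => innerLoop phases ph pc 0) (List.replicate phases.length 0)
          ((splitFile.filter (fun b => b != splitFile.headD "")).map (fun b => pvParse b notFound)) :=
    pv_filter_fold (fun (pc : List Int) ph => innerLoop phases ph pc 0)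
      (splitFile.headD "") notFound splitFile (List.replicate phases.length 0)
  have hT : List.foldl (fun (d : PySem.Dict String Int) b =>
        if (b != splitFile.headD "") = true then
          d.insert (pvParse b notFound) (d.getD (pvParse b notFound) 0 + 1)
        else d) PySem.Dict.empty splitFile
      = List.foldl (fun d ph => d.insert ph (d.getD ph 0 + 1)) PySem.Dict.empty
          ((splitFile.filter (fun b => b != splitFile.headD "")).map (fun b => pvParse b notFound)) :=
    pv_filter_fold (fun (d : PySem.Dict String Int) ph => d.insert ph (d.getD ph 0 + 1))
      (splitFile.headD "") notFound splitFile PySem.Dict.empty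
  rw [hA, hT]
  set ps := (splitFile.filter (fun b => b != splitFile.headD "")).map
      (fun b => pvParse b notFound) with hps
  set table := List.foldl (fun (d : PySem.Dict String Int) ph => d.insert ph (d.getD ph 0 + 1))
      PySem.Dict.empty ps with htbl
  rw [pvBRes_fold table phases (PySem.Set.ofList []) [], List.nil_append]
  apply List.ext_getElem
  · rw [foldA_len, List.length_replicate, pvBRes_len]
  · intro j hj1 hj2
    have hjp : j < phases.length := by
      rw [foldA_len, List.length_replicate] at hj1; exact hj1
    rw [← List.getD_eq_getElem _ 0 hj1, ← List.getD_eq_getElem _ 0 hj2]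
    rw [foldA_getD phases ps (List.replicate phases.length 0) (by simp) j hjp]
    rw [pvBRes_getD table phases (PySem.Set.ofList []) j hjp]
    have hgetD : table.getD phases[j] 0 = (ps.count phases[j] : Int) := by
      rw [htbl, PySem.Dict.getD_foldl_insert_add_one, PySem.Dict.getD_empty]
      ring
    have hnotin : phases[j] ∉ (PySem.Set.ofList ([] : List String)) := by
      intro hc
      simpa using (PySem.Set.mem_ofList _ _).mp hc
    have hrep : (List.replicate phases.length (0 : Int)).getD j 0 = 0 := by
      simp [List.getD_eq_getElem?_getD, hjp]
    rw [hrep, hgetD]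
    by_cases hmask : phases.idxOf phases[j] = j
    · have hnt : ¬ phases[j] ∈ phases.take j := by
        rw [mem_take_iff_idxOf_ne phases j hjp]
        simp [hmask]
      rw [if_pos hmask, if_neg (fun hh => hh.elim hnotin hnt)]
      ring
    · have hnt : phases[j] ∈ phases.take j :=
        (mem_take_iff_idxOf_ne phases j hjp).mpr hmask
      rw [if_neg hmask, if_pos (Or.inr hnt)]
      ring
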